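-- pv_equiv track=rewrite | github.com/agentmediaacc-cyber/tarasi | backups/real-admin-20260513-172015/services/profile_service.py | _build_saved_drivers
-- ===== SOURCE A (Python) =====
-- from typing import Any
--
-- def _build_saved_drivers(active: list[dict[str, Any]], completed: list[dict[str, Any]]) -> list[dict[str, str]]:
--     drivers = []
--     source = active + completed
--     for booking in source:
--         name = booking.get("driver_name") or "Tarasi chauffeur"
--         if any(item["name"] == name for item in drivers):
--             continue
--         drivers.append(
--             {
--                 "name": name,
--                 "vehicle": booking.get("preferred_vehicle") or booking.get("car") or "Premium vehicle",
--                 "rating": "4.9",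
--             }
--         )
--         if len(drivers) == 3:
--             break
--     if not drivers:
--         drivers.append({"name": "Tarasi chauffeur", "vehicle": "Executive fleet", "rating": "4.9"})
--     return drivers
-- ===== SOURCE B (Python) =====
-- def _build_saved_drivers(active, completed):
--     # Recursive sieve: take the head booking, emit its entry, then filter every
--     # later booking with the same driver name out of the remainder and recurse
--     # with a decremented budget of 3.  No accumulator membership scans.
--     def pick(source, budget):
--         if budget == 0 or not source:
--             return []
--         head, rest = source[0], source[1:]
--         name = head.get("driver_name") or "Tarasi chauffeur"
--         entry = {
--             "name": name,
--             "vehicle": head.get("preferred_vehicle") or head.get("car") or "Premium vehicle",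
--             "rating": "4.9",
--         }
--         survivors = [b for b in rest if (b.get("driver_name") or "Tarasi chauffeur") != name]
--         return [entry] + pick(survivors, budget - 1)
--
--     return pick(active + completed, 3) or [
--         {"name": "Tarasi chauffeur", "vehicle": "Executive fleet", "rating": "4.9"}
--     ]
-- ===== Notes on version B (the rewrite author's own statement) =====
-- stated objective: alternative
-- what changed: Replaced A's single scan that accumulates a drivers list, tests membership with any() against that accumulator, and breaks at length 3, by a recursive sieve: emit the head booking's entry, filter all same-named bookings out of the remaining source, and recurse with a budget of 3; no accumulator and no membership scan remain.
import Mathlib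
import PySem

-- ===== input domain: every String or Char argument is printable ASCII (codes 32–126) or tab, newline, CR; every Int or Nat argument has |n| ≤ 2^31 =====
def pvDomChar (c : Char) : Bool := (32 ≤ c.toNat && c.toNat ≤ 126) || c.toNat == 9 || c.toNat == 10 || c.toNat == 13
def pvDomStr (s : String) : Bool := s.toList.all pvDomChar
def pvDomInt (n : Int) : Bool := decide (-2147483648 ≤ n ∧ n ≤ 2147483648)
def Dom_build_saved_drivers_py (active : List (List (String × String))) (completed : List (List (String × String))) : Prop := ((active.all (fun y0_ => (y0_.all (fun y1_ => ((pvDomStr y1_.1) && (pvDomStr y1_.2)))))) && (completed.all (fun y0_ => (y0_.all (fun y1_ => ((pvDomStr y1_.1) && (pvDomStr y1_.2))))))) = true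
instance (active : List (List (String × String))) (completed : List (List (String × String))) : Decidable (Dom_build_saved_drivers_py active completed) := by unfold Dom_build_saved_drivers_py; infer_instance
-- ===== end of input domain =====

-- B replaces A's accumulate-and-membership-scan loop with an early break by a recursive
-- sieve: emit the head's entry, filter same-named bookings out of the remainder, recurse
-- with a budget of 3; alternative decomposition, same cost.

-- booking.get(k): first-match lookup in the association list (exact: a Python dict has unique keys)
def pvGetS (b : List (String × String)) (k : String) : String :=
  ((PySem.Dict.mk b).get? k).getD ""

-- `booking.get("driver_name") or "Tarasi chauffeur"` (None and "" are both falsy)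
def pvNameOf (b : List (String × String)) : String :=
  let s := pvGetS b "driver_name"
  if s == "" then "Tarasi chauffeur" else s

-- the dict literal both Pythons build for a booking
def pvEntryOf (b : List (String × String)) (name : String) : List (String × String) :=
  let pv := pvGetS b "preferred_vehicle"
  let veh := if pv == "" then (let c := pvGetS b "car"; if c == "" then "Premium vehicle" else c) else pv
  [("name", name), ("vehicle", veh), ("rating", "4.9")]

-- `any(item["name"] == name for item in drivers)`
def pvHasName (drivers : List (List (String × String))) (name : String) : Bool :=
  drivers.any (fun item => (PySem.Dict.mk item).get? "name" == some name)

-- ===== PORT A =====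
-- the for-loop with `continue` and `break` at len == 3
def pvLoopA : List (List (String × String)) → List (List (String × String)) → List (List (String × String))
  | [], drivers => drivers
  | b :: rest, drivers =>
      let name := pvNameOf b
      if pvHasName drivers name then
        pvLoopA rest drivers
      else
        let drivers' := drivers ++ [pvEntryOf b name]
        if drivers'.length == 3 then drivers' else pvLoopA rest drivers'

def build_saved_drivers_py (active : List (List (String × String))) (completed : List (List (String × String))) : List (List (String × String)) :=
  let drivers := pvLoopA (active ++ completed) []
  if drivers.isEmpty then [[("name", "Tarasi chauffeur"), ("vehicle", "Executive fleet"), ("rating", "4.9")]]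
  else drivers

-- ===== PORT B =====
-- the recursive sieve `pick(source, budget)`: head's entry, then recurse on the
-- remainder filtered of same-named bookings, budget decremented
def pvPickB : Nat → List (List (String × String)) → List (List (String × String))
  | 0, _ => []
  | _ + 1, [] => []
  | n + 1, b :: rest =>
      let name := pvNameOf b
      pvEntryOf b name :: pvPickB n (rest.filter (fun b' => pvNameOf b' != name))

def build_saved_drivers_py_alt (active : List (List (String × String))) (completed : List (List (String × String))) : List (List (String × String)) :=
  let result := pvPickB 3 (active ++ completed)
  if result.isEmpty then [[("name", "Tarasi chauffeur"), ("vehicle", "Executive fleet"), ("rating", "4.9")]]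
  else result

-- ===== PRECONDITION & SPEC =====
def Spec_build_saved_drivers_py (active : List (List (String × String))) (completed : List (List (String × String))) (out : List (List (String × String))) : Prop := out = build_saved_drivers_py_alt active completed
instance (active : List (List (String × String))) (completed : List (List (String × String))) (out : List (List (String × String))) : Decidable (Spec_build_saved_drivers_py active completed out) := by unfold Spec_build_saved_drivers_py; infer_instance

-- ===== CLAIM (what is proved, stated in full; the proofs are below) =====
def Claim_equal_build_saved_drivers_py : Prop := ∀ (active : List (List (String × String))) (completed : List (List (String × String))), Dom_build_saved_drivers_py active completed → Spec_build_saved_drivers_py active completed (build_saved_drivers_py active completed)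

-- ===== LEMMAS AND PROOFS =====

lemma pick_nil (n : Nat) : pvPickB n [] = [] := by cases n <;> rfl

-- appending the entry built for `name` adds exactly `name` to the seen names
lemma pvHasName_append (drivers : List (List (String × String))) (b : List (String × String)) (name n : String) :
    pvHasName (drivers ++ [pvEntryOf b name]) n = (pvHasName drivers n || (n == name)) := by
  by_cases h : n = name
  · subst h; simp [pvHasName, List.any_append, pvEntryOf, PySem.Dict.get?_mk_cons]
  · simp only [pvHasName, List.any_append, pvEntryOf]
    have h1 : (name == n) = false := by simpa using fun hh : name = n => h hh.symm
    have h2 : (n == name) = false := by simpa using h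
    simp [h1, h2, PySem.Dict.get?_mk_cons]

-- surviving A's membership test against `drivers ++ [entry]` = surviving it against
-- `drivers` AND B's name filter
lemma pred_split (drivers : List (List (String × String))) (b : List (String × String)) (x : List (String × String)) :
    ((!pvHasName drivers (pvNameOf x)) && (pvNameOf x != pvNameOf b))
      = !pvHasName (drivers ++ [pvEntryOf b (pvNameOf b)]) (pvNameOf x) := by
  rw [pvHasName_append, Bool.not_or]; simp [bne]

-- main invariant: A's loop continued from `drivers` (< 3 entries) equals `drivers`
-- followed by B's sieve with the remaining budget on the not-yet-seen bookings
lemma loopA_eq_pick (src : List (List (String × String))) :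
    ∀ drivers : List (List (String × String)), drivers.length < 3 →
      pvLoopA src drivers
        = drivers ++ pvPickB (3 - drivers.length) (src.filter (fun b => !pvHasName drivers (pvNameOf b))) := by
  induction src with
  | nil => intro drivers _; simp [pvLoopA, pick_nil]
  | cons b rest ih =>
      intro drivers hlen
      simp only [pvLoopA]
      by_cases hn : pvHasName drivers (pvNameOf b)
      · rw [if_pos hn, ih drivers hlen]
        have : List.filter (fun b' => !pvHasName drivers (pvNameOf b')) (b :: rest)
            = List.filter (fun b' => !pvHasName drivers (pvNameOf b')) rest := by
          simp [hn]
        rw [this]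
      · have hn' : pvHasName drivers (pvNameOf b) = false := by simpa using hn
        rw [if_neg hn]
        have hfc : List.filter (fun b' => !pvHasName drivers (pvNameOf b')) (b :: rest)
            = b :: List.filter (fun b' => !pvHasName drivers (pvNameOf b')) rest := by
          simp [hn']
        obtain ⟨m, hm⟩ : ∃ m, 3 - drivers.length = m + 1 := ⟨2 - drivers.length, by omega⟩
        rw [hfc, hm]
        simp only [pvPickB]
        have hcomb : (List.filter (fun b' => !pvHasName drivers (pvNameOf b')) rest).filter
              (fun b' => pvNameOf b' != pvNameOf b)
            = rest.filter (fun x => !pvHasName (drivers ++ [pvEntryOf b (pvNameOf b)]) (pvNameOf x)) := by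
          rw [List.filter_filter]
          exact List.filter_congr (fun x _ => by rw [Bool.and_comm, pred_split])
        by_cases h3 : (drivers ++ [pvEntryOf b (pvNameOf b)]).length == 3
        · rw [if_pos h3]
          have hl : drivers.length = 2 := by
            have := (beq_iff_eq).mp h3; simp at this; omega
          have hm0 : m = 0 := by omega
          subst hm0
          simp [pvPickB]
        · rw [if_neg (by simpa using h3)]
          have hlen' : (drivers ++ [pvEntryOf b (pvNameOf b)]).length < 3 := by
            have hne : ¬ (drivers ++ [pvEntryOf b (pvNameOf b)]).length = 3 := by
              intro hh; exact absurd ((beq_iff_eq).mpr hh) (by simpa using h3)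
            simp at hne ⊢; omega
          rw [ih _ hlen', hcomb]
          have hmm : 3 - (drivers ++ [pvEntryOf b (pvNameOf b)]).length = m := by
            simp at hm ⊢; omega
          rw [hmm]; simp

-- ===== VERDICT (by name: the statement is the Claim_ definition above) =====
theorem build_saved_drivers_py_spec : Claim_equal_build_saved_drivers_py := by
  intro active completed _
  unfold Spec_build_saved_drivers_py build_saved_drivers_py build_saved_drivers_py_alt
  have h := loopA_eq_pick (active ++ completed) [] (by simp)
  simp only [List.length_nil, Nat.sub_zero, List.nil_append] at h
  rw [h]
  have : (active ++ completed).filter (fun b => !pvHasName [] (pvNameOf b)) = active ++ completed := by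
    simp [pvHasName]
  rw [this]
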